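-- pv_equiv track=rewrite | github.com/tkiet79/Coding_Practice | GeeksForGeeks/geeksforgeeks_K-Pangrams.py | kPangram
-- ===== SOURCE A (Python) =====
-- def kPangram(string, k):
--     arr = [char for char in string if char != ' ']
--     n = len(arr)
--     if n < 26:
--         return False
--
--     check = []
--     for value in arr:
--         check.append(value)
--
--     check = len(list(set(arr)))
--
--     return check + k >= 26
-- ===== SOURCE B (Python) =====
-- def kPangram(string, k):
--     arr = [char for char in string if char != ' ']
--     if len(arr) < 26:
--         return False
--     s = sorted(arr)
--     distinct = 1
--     prev = s[0]
--     for c in s[1:]: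
--         if c != prev:
--             distinct += 1
--         prev = c
--     return distinct + k >= 26
-- ===== Notes on version B (the rewrite author's own statement) =====
-- stated objective: alternative
-- what changed: B replaces A's hash-set distinct count (plus A's dead list-append loop) with a sort of the non-space characters followed by a single adjacent-difference scan that counts distinct elements.
import Mathlib
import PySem

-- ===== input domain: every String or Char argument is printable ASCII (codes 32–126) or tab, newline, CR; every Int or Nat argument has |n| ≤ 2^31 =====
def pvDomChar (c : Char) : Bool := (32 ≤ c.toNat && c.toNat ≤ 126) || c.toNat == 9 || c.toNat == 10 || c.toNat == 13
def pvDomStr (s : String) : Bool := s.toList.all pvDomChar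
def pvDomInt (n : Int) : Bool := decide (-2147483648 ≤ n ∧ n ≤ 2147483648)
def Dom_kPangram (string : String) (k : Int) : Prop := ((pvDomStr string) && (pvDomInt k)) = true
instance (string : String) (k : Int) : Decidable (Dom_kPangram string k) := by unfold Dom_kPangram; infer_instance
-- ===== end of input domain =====

-- ===== PORT A =====
-- B replaces A's hash-set distinct count (and dead append loop) by a sort-then-adjacent-scan distinct count (alternative algorithm, same result).
def kPangram (string : String) (k : Int) : Bool :=
  let arr : List Char := string.toList.filter (fun c => c != ' ')
  let n : Int := (arr.length : Int)
  if n < 26 then false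
  else
    -- dead code in A: check = []; for value in arr: check.append(value)  (then rebound)
    let _check₀ : List Char := arr.foldl (fun acc v => acc ++ [v]) []
    let check : Int := ((PySem.Set.ofList arr).length : Int)
    decide (check + k ≥ 26)

-- ===== PORT B =====
def kPangram_alt (string : String) (k : Int) : Bool :=
  let arr : List Char := string.toList.filter (fun c => c != ' ')
  if (arr.length : Int) < 26 then false
  else
    let s : List Char := PySem.List.sorted arr (fun c => c)
    match s with
    | [] => false   -- unreachable (arr has ≥ 26 chars); Python's s[0] is only read on nonempty s
    | p :: rest =>
      let st := rest.foldl (fun (st : Int × Char) c => (if c != st.2 then st.1 + 1 else st.1, c)) (1, p)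
      decide (st.1 + k ≥ 26)

-- ===== PRECONDITION & SPEC =====
def Spec_kPangram (string : String) (k : Int) (out : Bool) : Prop := out = kPangram_alt string k
instance (string : String) (k : Int) (out : Bool) : Decidable (Spec_kPangram string k out) := by unfold Spec_kPangram; infer_instance

-- ===== CLAIM (what is proved, stated in full; the proofs are below) =====
def Claim_equal_kPangram : Prop := ∀ (string : String) (k : Int), Dom_kPangram string k → Spec_kPangram string k (kPangram string k)

-- ===== LEMMAS AND PROOFS =====

-- The adjacent-difference scan over a sorted (Pairwise ≤) list counts its distinct elements.
lemma scan_count (rest : List Char) (prev : Char) (d : Int)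
    (h : List.Pairwise (fun a b => a ≤ b) (prev :: rest)) :
    (rest.foldl (fun (st : Int × Char) c => (if c != st.2 then st.1 + 1 else st.1, c)) (d, prev)).1
      = d + ((prev :: rest).toFinset.card : Int) - 1 := by
  induction rest generalizing prev d with
  | nil => simp
  | cons c rest ih =>
    rcases List.pairwise_cons.mp h with ⟨hprev, htail⟩
    have hpc : prev ≤ c := hprev c (by simp)
    by_cases hc : c = prev
    · subst hc
      have := ih c d htail
      simp only [List.foldl_cons, bne_self_eq_false, Bool.false_eq_true, if_false]
      rw [this]
      congr 2
      simp
    · have hne : (c != prev) = true := by simp [bne, hc]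
      have hlt : prev < c := lt_of_le_of_ne hpc (fun e => hc e.symm)
      have hnotmem : prev ∉ (c :: rest).toFinset := by
        simp only [List.toFinset_cons, Finset.mem_insert, List.mem_toFinset, not_or]
        refine ⟨ne_of_lt hlt, fun hx => ?_⟩
        have hcx : c ≤ prev := (List.pairwise_cons.mp htail).1 prev hx
        exact absurd (lt_of_lt_of_le hlt hcx) (lt_irrefl _)
      have := ih c (d + 1) htail
      simp only [List.foldl_cons, hne, if_true]
      rw [this]
      have hcard : ((prev :: c :: rest).toFinset).card = ((c :: rest).toFinset).card + 1 := by
        have : (prev :: c :: rest).toFinset = insert prev (c :: rest).toFinset := by simp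
        rw [this, Finset.card_insert_of_notMem hnotmem]
      rw [hcard]
      push_cast
      ring

-- A's hash-set distinct count is the toFinset cardinality.
lemma setOfList_length (arr : List Char) :
    (PySem.Set.ofList arr).length = arr.toFinset.card := by
  have hnd := PySem.Set.nodup_ofList arr
  have : (PySem.Set.ofList arr).toFinset = arr.toFinset := by
    ext x; simp [PySem.Set.mem_ofList]
  rw [← List.toFinset_card_of_nodup hnd, this]

-- ===== VERDICT (by name: the statement is the Claim_ definition above) =====
theorem kPangram_spec : Claim_equal_kPangram := by
  intro string k _
  unfold Spec_kPangram kPangram kPangram_alt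
  set arr : List Char := string.toList.filter (fun c => c != ' ') with harr
  by_cases hn : (arr.length : Int) < 26
  · simp [hn]
  · simp only [hn, if_false]
    have harrne : arr ≠ [] := by
      intro h0
      rw [h0] at hn
      simp at hn
    have hsne : PySem.List.sorted arr (fun c => c) ≠ [] := by
      simpa [PySem.List.sorted_eq_nil_iff] using harrne
    rcases hs : PySem.List.sorted arr (fun c => c) with _ | ⟨p, rest⟩
    · exact absurd hs hsne
    · simp only []
      have hpair : List.Pairwise (fun a b => a ≤ b) (p :: rest) := by
        have := PySem.List.sorted_pairwise arr (fun c => c)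
        rwa [hs] at this
      have hcount := scan_count rest p 1 hpair
      have hperm : (p :: rest).Perm arr := by
        have := PySem.List.sorted_perm arr (fun c => c) false
        rwa [hs] at this
      have hfin : (p :: rest).toFinset = arr.toFinset := List.toFinset_eq_of_perm _ _ hperm
      rw [hcount, hfin, ← setOfList_length arr]
      norm_num

-- dead-binding note: _check₀ mirrors A's overwritten 'check' list; it is unused, as in A.
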